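-- pv_equiv track=rewrite | github.com/kolikaran1992/keras_bilstm_crf | trainer.py | _ent_to_labels
-- ===== SOURCE A (Python) =====
-- def _ent_to_labels(ent_to_tok_map):
--     """
--     --> convert "entity to token map" to labels
--     --> convert single entity to labels
--     :param ent_to_tok_map: list
--     :return (labels): list
--     """
--     start, stop, label = ent_to_tok_map
--
--     if start == stop == -1 and label == '':
--         return []
--
--     total_toks = list(range(start, stop + 1))
--
--     if len(total_toks) == 1:
--         return [(total_toks[0], 'S-{}'.format(label))]
--     elif len(total_toks) == 2:
--         return [(total_toks[0], 'B-{}'.format(label)),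
--                 (total_toks[1], 'E-{}'.format(label))]
--     else:
--         obj = [(total_toks[0], 'B-{}'.format(label))]
--         obj += [(tok_idx, 'I-{}'.format(label)) for tok_idx in total_toks[1:-1]]
--         obj += [(total_toks[-1], 'E-{}'.format(label))]
--         return obj
-- ===== SOURCE B (Python) =====
-- def _ent_to_labels(ent_to_tok_map):
--     """
--     --> convert "entity to token map" to labels
--     --> convert single entity to labels
--     :param ent_to_tok_map: list
--     :return (labels): list
--     """
--     start, stop, label = ent_to_tok_map
--
--     if start == stop == -1 and label == '':
--         return []
--
--     n = stop - start + 1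
--     prefixes = 'S' if n == 1 else 'B' + 'I' * (n - 2) + 'E'
--     return [(start + i, p + '-' + label) for i, p in enumerate(prefixes)]
-- ===== Notes on version B (the rewrite author's own statement) =====
-- stated objective: alternative
-- what changed: Instead of A's three length-case branches each assembling the pair list from slices and concatenations, B first builds the whole BIOES prefix pattern as one string by string arithmetic ('S' or 'B' + 'I'*(n-2) + 'E') and then zips it with token positions via enumerate.
import Mathlib
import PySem

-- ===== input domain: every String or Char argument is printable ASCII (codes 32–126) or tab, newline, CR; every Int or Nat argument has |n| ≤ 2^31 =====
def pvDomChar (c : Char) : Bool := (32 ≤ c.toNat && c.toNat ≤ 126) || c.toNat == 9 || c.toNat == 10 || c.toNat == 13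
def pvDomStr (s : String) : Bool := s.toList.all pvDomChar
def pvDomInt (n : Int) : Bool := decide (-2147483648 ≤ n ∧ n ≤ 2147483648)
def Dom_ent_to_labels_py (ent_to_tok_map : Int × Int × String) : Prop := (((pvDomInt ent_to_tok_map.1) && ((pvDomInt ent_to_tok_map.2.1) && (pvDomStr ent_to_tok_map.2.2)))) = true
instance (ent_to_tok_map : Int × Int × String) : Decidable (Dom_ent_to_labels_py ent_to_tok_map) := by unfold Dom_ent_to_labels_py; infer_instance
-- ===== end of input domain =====

-- B builds the BIOES prefix pattern as one string ('S' or 'B'+'I'*(n-2)+'E') and zips it with positions (alternative decomposition; same cost).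


-- ===== PORT A =====
def ent_to_labels_py (ent_to_tok_map : Int × Int × String) : List (Int × String) :=
  let start := ent_to_tok_map.1
  let stop := ent_to_tok_map.2.1
  let label := ent_to_tok_map.2.2
  if start = -1 ∧ stop = -1 ∧ label = "" then []
  else
    let total_toks := PySem.List.pyRange start (stop + 1) 1
    if total_toks.length = 1 then
      [(PySem.List.pyGetD total_toks 0 0, "S-" ++ label)]
    else if total_toks.length = 2 then
      [(PySem.List.pyGetD total_toks 0 0, "B-" ++ label),
       (PySem.List.pyGetD total_toks 1 0, "E-" ++ label)]
    else
      -- total_toks[0] raises IndexError on an empty range: excluded by Pre_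
      [(PySem.List.pyGetD total_toks 0 0, "B-" ++ label)]
        ++ (PySem.List.slice total_toks (some 1) (some (-1))).map (fun tok_idx => (tok_idx, "I-" ++ label))
        ++ [(PySem.List.pyGetD total_toks (-1) 0, "E-" ++ label)]

-- ===== PORT B =====
def ent_to_labels_py_alt (ent_to_tok_map : Int × Int × String) : List (Int × String) :=
  let start := ent_to_tok_map.1
  let stop := ent_to_tok_map.2.1
  let label := ent_to_tok_map.2.2
  if start = -1 ∧ stop = -1 ∧ label = "" then []
  else
    let n := stop - start + 1
    -- prefixes = 'S' if n == 1 else 'B' + 'I' * (n - 2) + 'E'   ('I'*(n-2) is '' for n-2 ≤ 0, as in Python)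
    let prefixes : List Char := if n = 1 then ['S'] else 'B' :: (List.replicate (n - 2).toNat 'I' ++ ['E'])
    (PySem.List.enumerate prefixes 0).map (fun ip => (start + ip.1, String.ofList [ip.2] ++ "-" ++ label))

-- ===== PRECONDITION & SPEC =====
-- Pre_ excludes exactly the non-sentinel empty ranges (start > stop), on which A raises IndexError via total_toks[0].
def Pre_ent_to_labels_py (ent_to_tok_map : Int × Int × String) : Prop :=
  ent_to_tok_map.1 ≤ ent_to_tok_map.2.1
instance (ent_to_tok_map : Int × Int × String) : Decidable (Pre_ent_to_labels_py ent_to_tok_map) := by unfold Pre_ent_to_labels_py; infer_instance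
def pvWitness_ent_to_labels_py : (Int × Int × String) := (2, 5, "PER")

def Spec_ent_to_labels_py (ent_to_tok_map : Int × Int × String) (out : List (Int × String)) : Prop := out = ent_to_labels_py_alt ent_to_tok_map
instance (ent_to_tok_map : Int × Int × String) (out : List (Int × String)) : Decidable (Spec_ent_to_labels_py ent_to_tok_map out) := by unfold Spec_ent_to_labels_py; infer_instance

-- ===== CLAIM (what is proved, stated in full; the proofs are below) =====
def Claim_equal_ent_to_labels_py : Prop := ∀ (ent_to_tok_map : Int × Int × String), Dom_ent_to_labels_py ent_to_tok_map → Pre_ent_to_labels_py ent_to_tok_map → Spec_ent_to_labels_py ent_to_tok_map (ent_to_labels_py ent_to_tok_map)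

-- ===== LEMMAS AND PROOFS =====
lemma enum_replicate (j : Nat) (t : Int) :
    PySem.List.enumerate (List.replicate j 'I') t
      = (List.range j).map (fun (i : Nat) => ((t + (i : Int), 'I') : Int × Char)) := by
  apply List.ext_getElem
  · simp [PySem.List.length_enumerate]
  · intro i h1 h2
    rw [PySem.List.getElem_enumerate, List.getElem_map, List.getElem_replicate, List.getElem_range]

lemma main_eq (s : Int) (m : Nat) (l : String) :
    ent_to_labels_py (s, s + m, l) = ent_to_labels_py_alt (s, s + m, l) := by
  unfold ent_to_labels_py ent_to_labels_py_alt
  dsimp only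
  by_cases h : s = -1 ∧ s + (m : Int) = -1 ∧ l = ""
  · obtain ⟨hs, hsm, hl⟩ := h
    have hm : m = 0 := by omega
    subst hm hs hl
    simp
  · simp only [h, if_false]
    have h1 : s + (m : Int) + 1 - s = (m : Int) + 1 := by ring
    rw [PySem.List.pyRange_one s, h1]
    have h3 : ((m : Int) + 1).toNat = m + 1 := by omega
    rw [h3]
    have hb : s + (m : Int) - s + 1 = (m : Int) + 1 := by ring
    rw [hb]
    have hn2 : ((m : Int) + 1 - 2).toNat = m - 1 := by omega
    rw [hn2]
    match m with
    | 0 =>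
      norm_num [List.range_succ, PySem.List.pyGetD_zero_cons, PySem.List.enumerate_cons,
                PySem.List.enumerate_nil]
      rfl
    | 1 =>
      rw [if_neg (show ¬((1:Nat):Int) + 1 = 1 from by norm_num)]
      simp [List.range_succ, PySem.List.enumerate_cons, PySem.List.enumerate_nil]
      norm_num [PySem.List.pyGetD]
    | (k+2) =>
      rw [if_neg (show ¬((k+2:Nat):Int) + 1 = 1 from by push_cast; omega)]
      simp only [List.length_map, List.length_range]
      rw [if_neg (by omega), if_neg (by omega)]
      have hfst : PySem.List.pyGetD ((List.range (k+2+1)).map (fun (j : Nat) => s + (j:Int))) 0 0 = s := by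
        simp [List.range_succ_eq_map, PySem.List.pyGetD_zero]
      have hlst : PySem.List.pyGetD ((List.range (k+2+1)).map (fun (j : Nat) => s + (j:Int))) (-1) 0 = s + ((k:Int)+2) := by
        rw [List.range_succ, List.map_append, List.map_singleton]
        rw [PySem.List.pyGetD_neg_one_append_singleton]
        push_cast
        ring
      have hsl : PySem.List.slice ((List.range (k+2+1)).map (fun (j : Nat) => s + (j:Int))) (some 1) (some (-1))
          = (List.range (k+1)).map (fun (j : Nat) => s + ((j:Int)+1)) := by
        simp [PySem.List.slice]
        apply List.ext_getElem
        · simp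
        · intro i hi1 hi2
          simp
      rw [hfst, hlst, hsl]
      rw [show (k + 2 - 1 : Nat) = k + 1 from by omega]
      rw [PySem.List.enumerate_cons, PySem.List.enumerate_append, enum_replicate,
          PySem.List.enumerate_cons, PySem.List.enumerate_nil]
      simp only [List.length_replicate, List.map_cons, List.map_append, List.map_map,
                 List.map_nil, List.nil_append, List.cons_append]
      congr 1
      · simp only [Prod.mk.injEq]
        exact ⟨by ring, rfl⟩
      congr 1
      · refine List.map_congr_left (fun j _ => ?_)
        simp only [Function.comp_apply, Prod.mk.injEq]
        exact ⟨by push_cast; ring, rfl⟩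
      · simp only [List.cons.injEq, Prod.mk.injEq]
        refine ⟨⟨by push_cast; ring, ?_⟩, ?_⟩ <;> first | rfl | trivial

-- ===== VERDICT (by name: the statement is the Claim_ definition above) =====
theorem ent_to_labels_py_spec : Claim_equal_ent_to_labels_py := by
  intro ⟨s, t, l⟩ _ hpre
  unfold Spec_ent_to_labels_py
  have hst : s ≤ t := hpre
  obtain ⟨m, hm⟩ : ∃ m : Nat, t = s + m := ⟨(t - s).toNat, by omega⟩
  subst hm
  exact main_eq s m l
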